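-- pv_equiv track=rewrite | github.com/AxelGard/university-courses | tdde23-24/exam-exercise.py | merge_i
-- ===== SOURCE A (Python) =====
-- def merge_i(seq_1, seq_2):
--     both_seq = seq_1 + seq_2
--     new_seq = []
--     for val_1  in seq_1:
--         for val_2 in seq_2:
--             if val_1 > val_2:
--                 new_seq = new_seq + [val_1]
--
--     return new_seq
-- ===== SOURCE B (Python) =====
-- def merge_i(seq_1, seq_2):
--     # Sort seq_2 once, then count smaller elements per value by binary search,
--     # instead of A's nested scan with quadratic list re-allocation.
--     s = sorted(seq_2)
--     m = len(s)
--     out = []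
--     for v in seq_1:
--         lo, hi = 0, m
--         while lo < hi:
--             mid = (lo + hi) // 2
--             if s[mid] < v:
--                 lo = mid + 1
--             else:
--                 hi = mid
--         out += [v] * lo
--     return out
-- ===== Notes on version B (the rewrite author's own statement) =====
-- stated objective: faster
-- what changed: Replaced the nested scan (which also re-allocates the output list on every append) by sorting seq_2 once and counting, for each value of seq_1, the elements smaller than it with a hand-written binary search, emitting that many copies at once.
import Mathlib
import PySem

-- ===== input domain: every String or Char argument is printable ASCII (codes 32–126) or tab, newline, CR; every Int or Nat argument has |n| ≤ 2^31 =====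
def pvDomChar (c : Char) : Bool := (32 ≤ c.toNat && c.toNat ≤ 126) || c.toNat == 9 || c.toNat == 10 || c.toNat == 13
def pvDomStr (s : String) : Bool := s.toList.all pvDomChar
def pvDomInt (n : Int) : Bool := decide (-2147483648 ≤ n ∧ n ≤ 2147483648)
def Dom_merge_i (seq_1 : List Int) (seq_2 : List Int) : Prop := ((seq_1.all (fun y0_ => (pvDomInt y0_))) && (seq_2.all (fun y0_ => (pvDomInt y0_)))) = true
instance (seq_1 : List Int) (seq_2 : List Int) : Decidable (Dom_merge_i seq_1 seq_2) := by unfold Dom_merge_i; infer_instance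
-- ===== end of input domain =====

-- B sorts seq_2 once and counts smaller elements per seq_1 value by binary search,
-- instead of A's nested scan; objective: faster (asymptotic).


-- ===== PORT A =====
def merge_i (seq_1 : List Int) (seq_2 : List Int) : List Int :=
  let _both_seq := seq_1 ++ seq_2   -- computed and unused, as in A
  seq_1.foldl (fun new_seq val_1 =>
    seq_2.foldl (fun new_seq val_2 =>
      if val_1 > val_2 then new_seq ++ [val_1] else new_seq) new_seq) []

-- ===== PORT B =====
-- the 'while lo < hi' binary-search loop of Source B; s[mid] is in range whenever
-- lo < hi ≤ len s, so getD mid 0 is exact there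
def pvBisect (s : List Int) (v : Int) (lo hi : Nat) : Nat :=
  if lo < hi then
    -- mid = (lo + hi) // 2
    if s.getD ((lo + hi) / 2) 0 < v then pvBisect s v ((lo + hi) / 2 + 1) hi
    else pvBisect s v lo ((lo + hi) / 2)
  else lo
termination_by hi - lo
decreasing_by all_goals omega

def merge_i_alt (seq_1 : List Int) (seq_2 : List Int) : List Int :=
  let s := PySem.List.sorted seq_2 (fun x => x) false
  let m := s.length
  seq_1.foldl (fun out v => out ++ List.replicate (pvBisect s v 0 m) v) []

-- ===== PRECONDITION & SPEC =====
def Spec_merge_i (seq_1 : List Int) (seq_2 : List Int) (out : List Int) : Prop := out = merge_i_alt seq_1 seq_2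
instance (seq_1 : List Int) (seq_2 : List Int) (out : List Int) : Decidable (Spec_merge_i seq_1 seq_2 out) := by unfold Spec_merge_i; infer_instance

-- ===== CLAIM (what is proved, stated in full; the proofs are below) =====
def Claim_equal_merge_i : Prop := ∀ (seq_1 : List Int) (seq_2 : List Int), Dom_merge_i seq_1 seq_2 → Spec_merge_i seq_1 seq_2 (merge_i seq_1 seq_2)

-- ===== LEMMAS AND PROOFS =====

-- the binary search on a sorted list lands exactly at the first non-smaller index
theorem pvBisect_spec (s : List Int) (v : Int) (lo hi : Nat)
    (hhi : hi ≤ s.length) (hlh : lo ≤ hi)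
    (hsorted : s.Pairwise (· ≤ ·))
    (hlo : ∀ i, i < lo → s.getD i 0 < v)
    (hhi2 : ∀ i, hi ≤ i → i < s.length → ¬ s.getD i 0 < v) :
    (∀ i, i < pvBisect s v lo hi → s.getD i 0 < v) ∧
    (∀ i, pvBisect s v lo hi ≤ i → i < s.length → ¬ s.getD i 0 < v) ∧
    pvBisect s v lo hi ≤ s.length := by
  unfold pvBisect
  split
  · rename_i h
    have hmid : (lo + hi) / 2 < hi := by omega
    have hmidlo : lo ≤ (lo + hi) / 2 := by omega
    have hmids : (lo + hi) / 2 < s.length := by omega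
    split
    · rename_i hm
      refine pvBisect_spec s v _ hi hhi (by omega) hsorted ?_ hhi2
      intro i hi'
      have hil : i < s.length := by omega
      calc s.getD i 0 ≤ s.getD ((lo + hi) / 2) 0 := by
            rcases Nat.lt_or_ge i ((lo+hi)/2) with h'|h'
            · have := List.pairwise_iff_getElem.mp hsorted i ((lo+hi)/2) hil hmids h'
              simpa [List.getD_eq_getElem?_getD, List.getElem?_eq_getElem, hil, hmids] using this
            · have : i = (lo+hi)/2 := by omega
              simp [this]
        _ < v := hm
    · rename_i hm
      refine pvBisect_spec s v lo _ (by omega) (by omega) hsorted hlo ?_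
      intro i hmi hil hlt
      rcases Nat.lt_or_ge i hi with h'|h'
      · -- (lo+hi)/2 ≤ i < hi : s[mid] ≤ s[i] < v contradicts ¬ s[mid] < v
        rcases Nat.eq_or_lt_of_le hmi with he|he
        · exact hm (he ▸ hlt)
        · have := List.pairwise_iff_getElem.mp hsorted ((lo+hi)/2) i hmids hil he
          have hle : s.getD ((lo+hi)/2) 0 ≤ s.getD i 0 := by
            simpa [List.getD_eq_getElem?_getD, List.getElem?_eq_getElem, hil, hmids] using this
          exact hm (lt_of_le_of_lt hle hlt)
      · exact hhi2 i h' hil hlt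
  · exact ⟨fun i hi' => hlo i (by omega), fun i h1 h2 => hhi2 i (by omega) h2, by omega⟩
termination_by hi - lo
decreasing_by all_goals omega

-- a split position determines the count of elements below v
theorem countP_eq_of_split (s : List Int) (v : Int) (r : Nat)
    (hr : r ≤ s.length)
    (h1 : ∀ i, i < r → s.getD i 0 < v)
    (h2 : ∀ i, r ≤ i → i < s.length → ¬ s.getD i 0 < v) :
    s.countP (fun x => decide (x < v)) = r := by
  have hs : s = s.take r ++ s.drop r := (List.take_append_drop r s).symm
  rw [hs, List.countP_append]
  have ht : (s.take r).countP (fun x => decide (x < v)) = r := by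
    have : ∀ x ∈ s.take r, (fun x => decide (x < v)) x = true := by
      intro x hx
      rw [List.mem_iff_getElem] at hx
      obtain ⟨i, hil, hxe⟩ := hx
      have hil' : i < r := by
        simp [List.length_take] at hil; omega
      have hilen : i < s.length := by omega
      have : x = s.getD i 0 := by
        rw [← hxe]
        simp [List.getD_eq_getElem?_getD, hilen]
      rw [this]
      simpa using h1 i hil'
    rw [List.countP_eq_length.mpr this, List.length_take]
    omega
  have hd : (s.drop r).countP (fun x => decide (x < v)) = 0 := by
    rw [List.countP_eq_zero]
    intro x hx
    rw [List.mem_iff_getElem] at hx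
    obtain ⟨i, hil, hxe⟩ := hx
    have hilen : r + i < s.length := by
      simp [List.length_drop] at hil; omega
    have hx' : x = s.getD (r + i) 0 := by
      rw [← hxe]
      simp [List.getD_eq_getElem?_getD, hilen, List.getElem_drop]
    rw [hx']
    simpa using h2 (r + i) (by omega) hilen
  omega

-- B's per-value count equals A's inner-loop count
theorem pvBisect_eq_countP (seq_2 : List Int) (v : Int) :
    pvBisect (PySem.List.sorted seq_2 (fun x => x) false) v 0
        (PySem.List.sorted seq_2 (fun x => x) false).length
      = seq_2.countP (fun x => decide (x < v)) := by
  set s := PySem.List.sorted seq_2 (fun x => x) false with hsdef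
  have hsorted : s.Pairwise (· ≤ ·) := by
    simpa using PySem.List.sorted_pairwise seq_2 (fun x => x)
  obtain ⟨h1, h2, h3⟩ := pvBisect_spec s v 0 s.length le_rfl (Nat.zero_le _) hsorted
    (fun i hi => absurd hi (Nat.not_lt_zero i)) (fun i h1 h2 => by omega)
  have := countP_eq_of_split s v _ h3 h1 h2
  rw [← this]
  exact ((PySem.List.sorted_perm seq_2 (fun x => x) false).countP_eq _)

theorem inner_loop_eq (v : Int) (seq_2 acc : List Int) :
    seq_2.foldl (fun ns x => if v > x then ns ++ [v] else ns) acc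
      = acc ++ List.replicate (seq_2.countP (fun x => decide (x < v))) v := by
  induction seq_2 generalizing acc with
  | nil => simp
  | cons a t ih =>
    simp only [List.foldl_cons, List.countP_cons]
    by_cases h : v > a
    · rw [ih]
      simp [h, List.replicate_succ, List.append_assoc]
    · rw [ih]
      simp [h]

theorem merge_i_spec : Claim_equal_merge_i := by
  intro seq_1 seq_2 _
  unfold Spec_merge_i merge_i merge_i_alt
  simp only
  induction seq_1 using List.reverseRecOn with
  | nil => rfl
  | append_singleton xs v ih =>
    rw [List.foldl_append, List.foldl_append, ih (by
      unfold Dom_merge_i at *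
      simp_all)]
    simp only [List.foldl_cons, List.foldl_nil]
    rw [inner_loop_eq, pvBisect_eq_countP]
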